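-- pv_equiv track=rewrite | github.com/fullscreen-triangle/nebuchadnezzar | babylon/src/pharmacogenonics/oscillatory_profiler.py | _identify_therapeutic_targets
-- ===== SOURCE A (Python) =====
-- from typing import Dict, List, Tuple, Any, Optional
--
-- def _identify_therapeutic_targets(variants: List[Dict[str, Any]]) -> List[str]:
--     """Identify potential therapeutic targets based on variants."""
--     targets = []
--
--     # Analyze variants to identify therapeutic opportunities
--     gene_variants = {}
--     for variant in variants:
--         gene = variant.get('gene', '')
--         impact = variant.get('impact', 'UNKNOWN')
--         if gene not in gene_variants:
--             gene_variants[gene] = []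
--         gene_variants[gene].append(impact)
--
--     # Target identification logic
--     if 'INPP1' in gene_variants or 'GSK3B' in gene_variants:
--         targets.append('lithium_responsive_pathway')
--
--     if any(gene in gene_variants for gene in ['DRD2', 'HTR2A']):
--         targets.append('dopamine_serotonin_system')
--
--     if any(gene in gene_variants for gene in ['CYP2D6', 'CYP2C19', 'CYP3A4']):
--         targets.append('metabolic_optimization')
--
--     if 'SLC6A4' in gene_variants:
--         targets.append('serotonin_transport_system')
--
--     if 'COMT' in gene_variants:
--         targets.append('catecholamine_metabolism')
--
--     # Add general targets based on variant burden
--     if len(variants) >= 8: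
--         targets.append('multi_target_approach')
--
--     if len([v for v in variants if v.get('impact') == 'HIGH']) >= 2:
--         targets.append('precision_dosing_required')
--
--     return targets
-- ===== SOURCE B (Python) =====
-- # Inverted index: each gene maps directly to its target label; one pass over
-- # variants collects triggered labels and the HIGH-impact count, then the
-- # canonical label order is filtered against the triggered set.
-- _GENE_TO_LABEL = {
--     'INPP1': 'lithium_responsive_pathway',
--     'GSK3B': 'lithium_responsive_pathway',
--     'DRD2': 'dopamine_serotonin_system',
--     'HTR2A': 'dopamine_serotonin_system',
--     'CYP2D6': 'metabolic_optimization',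
--     'CYP2C19': 'metabolic_optimization',
--     'CYP3A4': 'metabolic_optimization',
--     'SLC6A4': 'serotonin_transport_system',
--     'COMT': 'catecholamine_metabolism',
-- }
-- _LABEL_ORDER = [
--     'lithium_responsive_pathway',
--     'dopamine_serotonin_system',
--     'metabolic_optimization',
--     'serotonin_transport_system',
--     'catecholamine_metabolism',
-- ]
--
-- def _identify_therapeutic_targets(variants):
--     """Identify potential therapeutic targets based on variants."""
--     labels = set()
--     high_count = 0
--     for variant in variants:
--         label = _GENE_TO_LABEL.get(variant.get('gene', ''))
--         if label is not None:
--             labels.add(label)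
--         if variant.get('impact') == 'HIGH':
--             high_count += 1
--     targets = [label for label in _LABEL_ORDER if label in labels]
--     if len(variants) >= 8:
--         targets.append('multi_target_approach')
--     if high_count >= 2:
--         targets.append('precision_dosing_required')
--     return targets
-- ===== Notes on version B (the rewrite author's own statement) =====
-- stated objective: simpler
-- what changed: Replaces A's gene->impacts grouping dict plus a chain of per-rule gene-membership tests with an inverted gene->label index consulted once per variant in a single pass (also counting HIGH impacts), after which the canonical label order is filtered against the set of triggered labels; the per-rule membership scans disappear.
import Mathlib
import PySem

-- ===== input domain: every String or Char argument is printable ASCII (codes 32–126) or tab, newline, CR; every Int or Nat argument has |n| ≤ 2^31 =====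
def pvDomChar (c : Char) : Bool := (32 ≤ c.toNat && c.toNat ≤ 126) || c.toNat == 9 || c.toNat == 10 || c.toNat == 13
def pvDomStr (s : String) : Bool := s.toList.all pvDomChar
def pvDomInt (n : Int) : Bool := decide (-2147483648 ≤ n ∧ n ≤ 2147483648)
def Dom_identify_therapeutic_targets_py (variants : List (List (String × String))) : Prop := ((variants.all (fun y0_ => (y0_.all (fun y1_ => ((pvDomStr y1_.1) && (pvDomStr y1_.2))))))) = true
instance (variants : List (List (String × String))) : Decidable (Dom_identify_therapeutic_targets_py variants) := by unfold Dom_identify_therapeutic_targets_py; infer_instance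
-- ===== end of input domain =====

-- B replaces A's gene->impacts grouping dict and per-rule gene-membership chain with an inverted
-- gene->label index consulted once per variant in a single pass, then filters the canonical label
-- order against the triggered-label set; simpler, same results.

-- ===== PORT A =====
def identify_therapeutic_targets_py (variants : List (List (String × String))) : List String :=
  -- gene_variants = {}; for variant in variants: …
  let gene_variants : PySem.Dict String (List String) :=
    variants.foldl
      (fun d variant =>
        let v : PySem.Dict String String := PySem.Dict.mk variant
        let gene := v.getD "gene" ""
        let impact := v.getD "impact" "UNKNOWN"
        let d := if d.contains gene then d else d.insert gene []
        d.modify gene [] (fun l => l ++ [impact]))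
      PySem.Dict.empty
  let targets : List String := []
  let targets := if gene_variants.contains "INPP1" || gene_variants.contains "GSK3B" then
      targets ++ ["lithium_responsive_pathway"] else targets
  let targets := if (["DRD2", "HTR2A"] : List String).any (fun g => gene_variants.contains g) then
      targets ++ ["dopamine_serotonin_system"] else targets
  let targets := if (["CYP2D6", "CYP2C19", "CYP3A4"] : List String).any (fun g => gene_variants.contains g) then
      targets ++ ["metabolic_optimization"] else targets
  let targets := if gene_variants.contains "SLC6A4" then
      targets ++ ["serotonin_transport_system"] else targets
  let targets := if gene_variants.contains "COMT" then
      targets ++ ["catecholamine_metabolism"] else targets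
  let targets := if variants.length ≥ 8 then targets ++ ["multi_target_approach"] else targets
  let targets := if (variants.filter
        (fun v => (PySem.Dict.mk v).get? "impact" == some "HIGH")).length ≥ 2 then
      targets ++ ["precision_dosing_required"] else targets
  targets

-- ===== PORT B =====
-- module-level constant _GENE_TO_LABEL of Source B
def pvGeneToLabel : PySem.Dict String String :=
  PySem.Dict.mk
    [("INPP1", "lithium_responsive_pathway"),
     ("GSK3B", "lithium_responsive_pathway"),
     ("DRD2", "dopamine_serotonin_system"),
     ("HTR2A", "dopamine_serotonin_system"),
     ("CYP2D6", "metabolic_optimization"),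
     ("CYP2C19", "metabolic_optimization"),
     ("CYP3A4", "metabolic_optimization"),
     ("SLC6A4", "serotonin_transport_system"),
     ("COMT", "catecholamine_metabolism")]

-- module-level constant _LABEL_ORDER of Source B
def pvLabelOrder : List String :=
  ["lithium_responsive_pathway",
   "dopamine_serotonin_system",
   "metabolic_optimization",
   "serotonin_transport_system",
   "catecholamine_metabolism"]

def identify_therapeutic_targets_py_alt (variants : List (List (String × String))) : List String :=
  -- single pass: triggered-label set + HIGH-impact count
  let acc : PySem.Set String × Int :=
    variants.foldl
      (fun (p : PySem.Set String × Int) variant =>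
        let v : PySem.Dict String String := PySem.Dict.mk variant
        let labels := match pvGeneToLabel.get? (v.getD "gene" "") with
          | some label => PySem.Set.add p.1 label
          | none => p.1
        (labels, if v.get? "impact" == some "HIGH" then p.2 + 1 else p.2))
      (PySem.Set.empty, 0)
  let labels := acc.1
  let high_count := acc.2
  let targets := pvLabelOrder.filter (fun label => PySem.Set.contains labels label)
  let targets := if variants.length ≥ 8 then targets ++ ["multi_target_approach"] else targets
  let targets := if high_count ≥ 2 then targets ++ ["precision_dosing_required"] else targets
  targets

-- ===== PRECONDITION & SPEC =====
def Spec_identify_therapeutic_targets_py (variants : List (List (String × String))) (out : List String) : Prop := out = identify_therapeutic_targets_py_alt variants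
instance (variants : List (List (String × String))) (out : List String) : Decidable (Spec_identify_therapeutic_targets_py variants out) := by unfold Spec_identify_therapeutic_targets_py; infer_instance

-- ===== CLAIM (what is proved, stated in full; the proofs are below) =====
def Claim_equal_identify_therapeutic_targets_py : Prop := ∀ (variants : List (List (String × String))), Dom_identify_therapeutic_targets_py variants → Spec_identify_therapeutic_targets_py variants (identify_therapeutic_targets_py variants)

-- ===== LEMMAS AND PROOFS =====

theorem pv_any_or {α : Type} (l : List α) (p q : α → Bool) :
    (l.any fun x => p x || q x) = (l.any p || l.any q) := by
  induction l with
  | nil => rfl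
  | cons x xs ih => simp [ih, Bool.or_assoc, Bool.or_left_comm]

-- A's grouping loop only grows the key set: membership = "some variant has this gene"
theorem pv_dict_loop (variants : List (List (String × String)))
    (d : PySem.Dict String (List String)) (g : String) :
    (variants.foldl
      (fun d variant =>
        let v : PySem.Dict String String := PySem.Dict.mk variant
        let gene := v.getD "gene" ""
        let impact := v.getD "impact" "UNKNOWN"
        let d := if d.contains gene then d else d.insert gene []
        d.modify gene [] (fun l => l ++ [impact])) d).contains g
    = (d.contains g || variants.any (fun v => g == (PySem.Dict.mk v).getD "gene" "")) := by
  induction variants generalizing d with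
  | nil => simp
  | cons v vs ih =>
    simp only [List.foldl_cons, List.any_cons]
    rw [ih]
    have hstep : ((if d.contains ((PySem.Dict.mk v).getD "gene" "") then d
        else d.insert ((PySem.Dict.mk v).getD "gene" "") []).modify
          ((PySem.Dict.mk v).getD "gene" "") [] (fun l => l ++ [(PySem.Dict.mk v).getD "impact" "UNKNOWN"])).contains g
        = (g == (PySem.Dict.mk v).getD "gene" "" || d.contains g) := by
      by_cases hc : d.contains ((PySem.Dict.mk v).getD "gene" "") = true
      · simp [PySem.Dict.contains_modify, hc]
      · simp only [Bool.not_eq_true] at hc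
        simp [PySem.Dict.contains_modify, PySem.Dict.contains_insert, hc]
    rw [hstep]
    simp [Bool.or_assoc, Bool.or_left_comm]

-- B's single pass: label membership = "some variant's gene maps to this label"; count = #HIGH
theorem pv_acc_loop (variants : List (List (String × String)))
    (s : PySem.Set String) (n : Int) :
    (∀ lab, PySem.Set.contains
        (variants.foldl
          (fun (p : PySem.Set String × Int) variant =>
            let v : PySem.Dict String String := PySem.Dict.mk variant
            let labels := match pvGeneToLabel.get? (v.getD "gene" "") with
              | some label => PySem.Set.add p.1 label
              | none => p.1
            (labels, if v.get? "impact" == some "HIGH" then p.2 + 1 else p.2)) (s, n)).1 lab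
      = (PySem.Set.contains s lab
          || variants.any (fun v => pvGeneToLabel.get? ((PySem.Dict.mk v).getD "gene" "") == some lab)))
    ∧ (variants.foldl
          (fun (p : PySem.Set String × Int) variant =>
            let v : PySem.Dict String String := PySem.Dict.mk variant
            let labels := match pvGeneToLabel.get? (v.getD "gene" "") with
              | some label => PySem.Set.add p.1 label
              | none => p.1
            (labels, if v.get? "impact" == some "HIGH" then p.2 + 1 else p.2)) (s, n)).2
      = n + (variants.countP (fun v => (PySem.Dict.mk v).get? "impact" == some "HIGH")) := by
  induction variants generalizing s n with
  | nil => simp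
  | cons v vs ih =>
    simp only [List.foldl_cons, List.any_cons, List.countP_cons]
    have hset : ∀ lab, PySem.Set.contains
        (match pvGeneToLabel.get? ((PySem.Dict.mk v).getD "gene" "") with
          | some label => PySem.Set.add s label
          | none => s) lab
        = (PySem.Set.contains s lab
            || (pvGeneToLabel.get? ((PySem.Dict.mk v).getD "gene" "") == some lab)) := by
      intro lab
      cases h : pvGeneToLabel.get? ((PySem.Dict.mk v).getD "gene" "") with
      | none => simp
      | some l =>
        simp only [Option.some_beq_some]
        rw [Bool.eq_iff_iff]
        simp only [PySem.Set.contains, List.contains_eq_mem, PySem.Set.mem_add,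
          Bool.or_eq_true, beq_iff_eq, decide_eq_true_eq]
        tauto
    obtain ⟨ih1, ih2⟩ := ih _ (if (PySem.Dict.mk v).get? "impact" == some "HIGH" then n + 1 else n)
    constructor
    · intro lab
      rw [ih1, hset]
      simp [Bool.or_assoc]
    · rw [ih2]
      by_cases hp : ((PySem.Dict.mk v).get? "impact" == some "HIGH") = true <;> simp [hp] <;> try ring

-- the inverted index agrees pointwise with A's per-rule gene tests
theorem pv_label_lith (g : String) :
    ("INPP1" == g || "GSK3B" == g) = (pvGeneToLabel.get? g == some "lithium_responsive_pathway") := by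
  simp only [pvGeneToLabel, PySem.Dict.get?_mk_cons]
  split_ifs <;> simp_all [PySem.Dict.get?] <;> try (subst_vars; decide)
theorem pv_label_dopa (g : String) :
    ("DRD2" == g || "HTR2A" == g) = (pvGeneToLabel.get? g == some "dopamine_serotonin_system") := by
  simp only [pvGeneToLabel, PySem.Dict.get?_mk_cons]
  split_ifs <;> simp_all [PySem.Dict.get?] <;> try (subst_vars; decide)
theorem pv_label_metab (g : String) :
    ("CYP2D6" == g || ("CYP2C19" == g || "CYP3A4" == g)) = (pvGeneToLabel.get? g == some "metabolic_optimization") := by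
  simp only [pvGeneToLabel, PySem.Dict.get?_mk_cons]
  split_ifs <;> simp_all [PySem.Dict.get?] <;> try (subst_vars; decide)
theorem pv_label_sero (g : String) :
    ("SLC6A4" == g) = (pvGeneToLabel.get? g == some "serotonin_transport_system") := by
  simp only [pvGeneToLabel, PySem.Dict.get?_mk_cons]
  split_ifs <;> simp_all [PySem.Dict.get?] <;> try (subst_vars; decide)
theorem pv_label_catech (g : String) :
    ("COMT" == g) = (pvGeneToLabel.get? g == some "catecholamine_metabolism") := by
  simp only [pvGeneToLabel, PySem.Dict.get?_mk_cons]
  split_ifs <;> simp_all [PySem.Dict.get?] <;> try (subst_vars; decide)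

-- ===== VERDICT (by name: the statement is the Claim_ definition above) =====
set_option maxHeartbeats 1000000 in
theorem identify_therapeutic_targets_py_spec : Claim_equal_identify_therapeutic_targets_py := by
  intro variants _
  unfold Spec_identify_therapeutic_targets_py
  unfold identify_therapeutic_targets_py identify_therapeutic_targets_py_alt
  obtain ⟨hmem, hcnt⟩ := pv_acc_loop variants PySem.Set.empty 0
  have hdict := pv_dict_loop variants PySem.Dict.empty
  have hempty : ∀ g : String, (PySem.Dict.empty : PySem.Dict String (List String)).contains g = false := by
    intro g; simp
  have hsempty : ∀ lab : String, PySem.Set.contains (PySem.Set.empty : PySem.Set String) lab = false := by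
    intro lab; simp [PySem.Set.contains, PySem.Set.empty]
  -- rewrite every gene-membership test on both sides to an 'any' over variants
  simp only [hdict, hempty, hmem, hsempty, Bool.false_or, List.any_cons, List.any_nil,
    Bool.or_false, hcnt, pvLabelOrder, List.filter_cons, List.filter_nil]
  rw [← pv_any_or variants (fun v => "INPP1" == (PySem.Dict.mk v).getD "gene" "")
        (fun v => "GSK3B" == (PySem.Dict.mk v).getD "gene" "")]
  rw [← pv_any_or variants (fun v => "DRD2" == (PySem.Dict.mk v).getD "gene" "")
        (fun v => "HTR2A" == (PySem.Dict.mk v).getD "gene" "")]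
  rw [← pv_any_or variants (fun v => "CYP2C19" == (PySem.Dict.mk v).getD "gene" "")
        (fun v => "CYP3A4" == (PySem.Dict.mk v).getD "gene" "")]
  rw [← pv_any_or variants (fun v => "CYP2D6" == (PySem.Dict.mk v).getD "gene" "")
        (fun v => ("CYP2C19" == (PySem.Dict.mk v).getD "gene" ""
                  || "CYP3A4" == (PySem.Dict.mk v).getD "gene" ""))]
  simp only [pv_label_lith, pv_label_dopa, pv_label_metab, pv_label_sero, pv_label_catech]
  have hfc : (List.filter (fun v => (PySem.Dict.mk v).get? "impact" == some "HIGH") variants).length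
      = List.countP (fun v => (PySem.Dict.mk v).get? "impact" == some "HIGH") variants :=
    List.countP_eq_length_filter.symm
  have h2 : ((2:Int) ≤ 0 + (List.countP (fun v => (PySem.Dict.mk v).get? "impact" == some "HIGH") variants : Int))
      ↔ 2 ≤ List.countP (fun v => (PySem.Dict.mk v).get? "impact" == some "HIGH") variants := by omega
  simp only [hfc, ge_iff_le, h2]
  generalize variants.any (fun v => pvGeneToLabel.get? ((PySem.Dict.mk v).getD "gene" "") == some "lithium_responsive_pathway") = e1
  generalize variants.any (fun v => pvGeneToLabel.get? ((PySem.Dict.mk v).getD "gene" "") == some "dopamine_serotonin_system") = e2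
  generalize variants.any (fun v => pvGeneToLabel.get? ((PySem.Dict.mk v).getD "gene" "") == some "metabolic_optimization") = e3
  generalize variants.any (fun v => pvGeneToLabel.get? ((PySem.Dict.mk v).getD "gene" "") == some "serotonin_transport_system") = e4
  generalize variants.any (fun v => pvGeneToLabel.get? ((PySem.Dict.mk v).getD "gene" "") == some "catecholamine_metabolism") = e5
  generalize List.countP (fun v => (PySem.Dict.mk v).get? "impact" == some "HIGH") variants = K
  generalize variants.length = L
  cases e1 <;> cases e2 <;> cases e3 <;> cases e4 <;> cases e5 <;> simp
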